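-- pv_equiv track=rewrite | github.com/WeerwaarT/LeetCode.py | LCP 30.py | magicTower
-- ===== SOURCE A (Python) =====
-- import heapq
-- from collections import deque
-- from typing import List
--
-- def magicTower(nums: List[int]) -> int:
--     if sum(nums) < 0:
--         return -1
--
--     hp = 1
--     queue = deque(nums)
--     heap = []
--     count = 0
--     while len(queue):
--         room = queue.popleft()
--         if room < 0:
--             heapq.heappush(heap, room)
--
--         hp += room
--         while hp <= 0:
--             adjust = heapq.heappop(heap)
--             hp -= adjust
--             queue.append(adjust)
--             count += 1
--
--     return count if hp > 0 else -1
-- ===== SOURCE B (Python) =====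
-- import heapq
-- from typing import List
--
-- def magicTower(nums: List[int]) -> int:
--     if sum(nums) < 0:
--         return -1
--     hp = 1
--     heap = []
--     count = 0
--     for room in nums:
--         if room < 0:
--             heapq.heappush(heap, room)
--         hp += room
--         while hp <= 0:
--             worst = heapq.heappop(heap)
--             hp -= worst
--             count += 1
--     return count
-- ===== Notes on version B (the rewrite author's own statement) =====
-- stated objective: simpler
-- what changed: B drops A's deque entirely: instead of re-appending each relocated negative room to the queue and walking that deferred tail a second time, B makes one forward pass over nums, popping the heap in place when hp <= 0 and counting without ever reprocessing a room; the trailing 'hp > 0' check becomes unnecessary.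
import Mathlib
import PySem

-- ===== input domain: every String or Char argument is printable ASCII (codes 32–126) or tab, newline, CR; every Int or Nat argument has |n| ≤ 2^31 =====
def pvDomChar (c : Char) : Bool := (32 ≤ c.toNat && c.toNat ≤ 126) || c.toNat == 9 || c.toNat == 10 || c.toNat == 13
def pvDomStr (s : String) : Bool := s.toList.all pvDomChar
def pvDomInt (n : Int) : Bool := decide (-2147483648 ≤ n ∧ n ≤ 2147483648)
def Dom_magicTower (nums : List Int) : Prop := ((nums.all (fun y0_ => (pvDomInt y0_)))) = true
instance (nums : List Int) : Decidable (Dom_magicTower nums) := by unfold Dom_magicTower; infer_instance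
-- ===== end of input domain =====

-- B replaces A's deque with re-enqueueing of relocated rooms by a single forward pass
-- over nums that never reprocesses a room (objective: simpler).

-- ===== PORT A =====
-- heapq.heappush on an int min-heap, ported by its observable behaviour:
-- insertion into an ascending list whose head is the minimum (exact for heapq on ints).
def heapPush (x : Int) : List Int → List Int
  | [] => [x]
  | y :: ys => if x ≤ y then x :: y :: ys else y :: heapPush x ys

-- A's inner `while hp <= 0`: pop the minimum, hp -= adjust, count += 1, and record the
-- popped values in order (they are appended to the deque).  Python's heappop raises
-- IndexError on an empty heap; that state is unreachable from every input, and the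
-- port exits the loop there.
def drainA (hp : Int) (heap : List Int) (count : Int) : Int × List Int × Int × List Int :=
  if hp ≤ 0 then
    match heap with
    | [] => (hp, [], count, [])
    | m :: hs =>
      let r := drainA (hp - m) hs (count + 1)
      (r.1, r.2.1, r.2.2.1, m :: r.2.2.2)
  else (hp, heap, count, [])

-- A's outer `while len(queue)`, one fuel unit per popleft; the deque can grow while it
-- runs, so the port carries fuel (2*len(nums)+1 is proved sufficient below).  Out of
-- fuel it returns the loop-exit value; this is never reached.
def aloop : Nat → List Int → List Int → Int → Int → Int
  | 0, _queue, _heap, hp, count => if hp > 0 then count else -1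
  | _f + 1, [], _heap, hp, count => if hp > 0 then count else -1
  | f + 1, room :: rest, heap, hp, count =>
    let heap1 := if room < 0 then heapPush room heap else heap
    let d := drainA (hp + room) heap1 count
    aloop f (rest ++ d.2.2.2) d.2.1 d.1 d.2.2.1

def magicTower (nums : List Int) : Int :=
  if nums.sum < 0 then -1
  else aloop (2 * nums.length + 1) nums [] 1 0

-- ===== PORT B =====
-- B's inner `while hp <= 0` (no re-enqueueing; same unreachable empty-heap exit).
def drainB (hp : Int) (heap : List Int) (count : Int) : Int × List Int × Int :=
  if hp ≤ 0 then
    match heap with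
    | [] => (hp, [], count)
    | m :: hs => drainB (hp - m) hs (count + 1)
  else (hp, heap, count)

-- one iteration of B's `for room in nums` over the state (hp, heap, count)
def stepB (s : Int × List Int × Int) (room : Int) : Int × List Int × Int :=
  drainB (s.1 + room) (if room < 0 then heapPush room s.2.1 else s.2.1) s.2.2

def magicTower_alt (nums : List Int) : Int :=
  if nums.sum < 0 then -1
  else (nums.foldl stepB (1, [], 0)).2.2

-- ===== PRECONDITION & SPEC =====
def Spec_magicTower (nums : List Int) (out : Int) : Prop := out = magicTower_alt nums
instance (nums : List Int) (out : Int) : Decidable (Spec_magicTower nums out) := by unfold Spec_magicTower; infer_instance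

-- ===== CLAIM (what is proved, stated in full; the proofs are below) =====
def Claim_equal_magicTower : Prop := ∀ (nums : List Int), Dom_magicTower nums → Spec_magicTower nums (magicTower nums)

-- ===== LEMMAS AND PROOFS =====

-- proof-only: B's pass instrumented to also collect, per input list, the values A
-- would append to its deque (the relocations), in order.
def runR : List Int → Int → List Int → Int → Int × List Int × Int × List Int
  | [], hp, heap, count => (hp, heap, count, [])
  | room :: rest, hp, heap, count =>
    let d := drainA (hp + room) (if room < 0 then heapPush room heap else heap) count
    let r := runR rest d.1 d.2.1 d.2.2.1
    (r.1, r.2.1, r.2.2.1, d.2.2.2 ++ r.2.2.2)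

theorem drainB_eq_drainA (heap : List Int) (hp count : Int) :
    drainB hp heap count
      = ((drainA hp heap count).1, (drainA hp heap count).2.1, (drainA hp heap count).2.2.1) := by
  induction heap generalizing hp count with
  | nil => rw [drainB, drainA]; split <;> rfl
  | cons m hs ih => rw [drainB, drainA]; split <;> simp [ih]

theorem foldB_eq_runR (nums : List Int) (hp : Int) (heap : List Int) (count : Int) :
    nums.foldl stepB (hp, heap, count)
      = ((runR nums hp heap count).1, (runR nums hp heap count).2.1,
         (runR nums hp heap count).2.2.1) := by
  induction nums generalizing hp heap count with
  | nil => simp [runR]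
  | cons room rest ih =>
    simp only [List.foldl_cons, runR, stepB, drainB_eq_drainA]
    exact ih _ _ _

theorem drainA_sum (heap : List Int) (hp count : Int) :
    (drainA hp heap count).1 + ((drainA hp heap count).2.2.2).sum = hp := by
  induction heap generalizing hp count with
  | nil => rw [drainA]; split <;> simp
  | cons m hs ih =>
    rw [drainA]; split
    · simpa using by linarith [ih (hp - m) (count + 1)]
    · simp

theorem drainA_len (heap : List Int) (hp count : Int) :
    (drainA hp heap count).2.1.length + ((drainA hp heap count).2.2.2).length ≤ heap.length := by
  induction heap generalizing hp count with
  | nil => rw [drainA]; split <;> simp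
  | cons m hs ih =>
    rw [drainA]; split
    · have := ih (hp - m) (count + 1); simp only [List.length_cons]; omega
    · simp

theorem drainA_nonpos (heap : List Int) (hp count : Int)
    (h : ∀ x ∈ heap, x ≤ 0) :
    (∀ x ∈ (drainA hp heap count).2.1, x ≤ 0) ∧
      (∀ x ∈ (drainA hp heap count).2.2.2, x ≤ 0) := by
  induction heap generalizing hp count with
  | nil => rw [drainA]; split <;> simp
  | cons m hs ih =>
    rw [drainA]; split
    · have := ih (hp - m) (count + 1) (fun x hx => h x (List.mem_cons_of_mem _ hx))
      constructor
      · simpa using this.1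
      · intro x hx
        simp at hx
        rcases hx with rfl | hx
        · exact h x (List.mem_cons_self ..)
        · exact this.2 x hx
    · exact ⟨h, by simp⟩

theorem mem_heapPush {x y : Int} {heap : List Int} (h : x ∈ heapPush y heap) :
    x = y ∨ x ∈ heap := by
  induction heap with
  | nil => simpa [heapPush] using h
  | cons z zs ih =>
    rw [heapPush] at h
    split at h
    · simpa using h
    · simp at h
      rcases h with rfl | h
      · simp
      · rcases ih h with h | h <;> simp [h]

theorem length_heapPush (x : Int) (heap : List Int) :
    (heapPush x heap).length = heap.length + 1 := by
  induction heap with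
  | nil => rfl
  | cons z zs ih => rw [heapPush]; split <;> simp [ih]

theorem runR_sum (rest : List Int) (hp : Int) (heap : List Int) (count : Int) :
    (runR rest hp heap count).1 + ((runR rest hp heap count).2.2.2).sum = hp + rest.sum := by
  induction rest generalizing hp heap count with
  | nil => simp [runR]
  | cons room r ih =>
    simp only [runR, List.sum_cons, List.sum_append]
    have hd := drainA_sum (if room < 0 then heapPush room heap else heap) (hp + room) count
    have := ih (drainA (hp + room) (if room < 0 then heapPush room heap else heap) count).1
      (drainA (hp + room) (if room < 0 then heapPush room heap else heap) count).2.1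
      (drainA (hp + room) (if room < 0 then heapPush room heap else heap) count).2.2.1
    linarith

theorem runR_len (rest : List Int) (hp : Int) (heap : List Int) (count : Int) :
    (runR rest hp heap count).2.1.length + ((runR rest hp heap count).2.2.2).length
      ≤ heap.length + rest.length := by
  induction rest generalizing hp heap count with
  | nil => simp [runR]
  | cons room r ih =>
    simp only [runR, List.length_append, List.length_cons]
    have hd := drainA_len (if room < 0 then heapPush room heap else heap) (hp + room) count
    have hh : (if room < 0 then heapPush room heap else heap).length ≤ heap.length + 1 := by
      split <;> simp [length_heapPush]
    have := ih (drainA (hp + room) (if room < 0 then heapPush room heap else heap) count).1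
      (drainA (hp + room) (if room < 0 then heapPush room heap else heap) count).2.1
      (drainA (hp + room) (if room < 0 then heapPush room heap else heap) count).2.2.1
    omega

theorem runR_nonpos (rest : List Int) (hp : Int) (heap : List Int) (count : Int)
    (h : ∀ x ∈ heap, x ≤ 0) :
    (∀ x ∈ (runR rest hp heap count).2.1, x ≤ 0) ∧
      (∀ x ∈ (runR rest hp heap count).2.2.2, x ≤ 0) := by
  induction rest generalizing hp heap count with
  | nil => simpa [runR] using h
  | cons room r ih =>
    simp only [runR]
    have hh : ∀ x ∈ (if room < 0 then heapPush room heap else heap), x ≤ 0 := by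
      split
      · intro x hx; rcases mem_heapPush hx with rfl | hx
        · omega
        · exact h x hx
      · exact h
    have hd := drainA_nonpos (if room < 0 then heapPush room heap else heap) (hp + room) count hh
    have := ih (drainA (hp + room) (if room < 0 then heapPush room heap else heap) count).1
      (drainA (hp + room) (if room < 0 then heapPush room heap else heap) count).2.1
      (drainA (hp + room) (if room < 0 then heapPush room heap else heap) count).2.2.1 hd.1
    refine ⟨this.1, ?_⟩
    intro x hx
    rcases List.mem_append.1 hx with hx | hx
    · exact hd.2 x hx
    · exact this.2 x hx

theorem sum_nonpos_of_all {l : List Int} (h : ∀ x ∈ l, x ≤ 0) : l.sum ≤ 0 := by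
  induction l with
  | nil => simp
  | cons a t ih =>
    have := h a (List.mem_cons_self ..)
    have := ih (fun x hx => h x (List.mem_cons_of_mem _ hx))
    simp only [List.sum_cons]; omega

-- main-pass simulation: A on (rest ++ tl) behaves like the instrumented single pass
-- on rest, with its relocations appended behind tl.
theorem aloop_main (rest : List Int) (tl : List Int) (hp : Int) (heap : List Int)
    (count : Int) (g : Nat) :
    aloop (rest.length + g) (rest ++ tl) heap hp count
      = aloop g (tl ++ (runR rest hp heap count).2.2.2)
          (runR rest hp heap count).2.1 (runR rest hp heap count).1
          (runR rest hp heap count).2.2.1 := by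
  induction rest generalizing tl hp heap count g with
  | nil => simp [runR]
  | cons room r ih =>
    simp only [List.length_cons, List.cons_append, runR]
    have : r.length + g + 1 = (r.length + g) + 1 := rfl
    rw [show r.length + 1 + g = (r.length + g) + 1 by omega, aloop]
    rw [List.append_assoc]
    rw [ih]
    simp [List.append_assoc]

-- tail phase: a queue of nonpositive relocated values with final hp positive is
-- consumed without any further relocation.
theorem aloop_tail (rel : List Int) (heap : List Int) (hp count : Int) (g : Nat)
    (hnp : ∀ x ∈ rel, x ≤ 0) (hpos : 0 < hp + rel.sum) (hg : rel.length ≤ g) :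
    aloop g rel heap hp count = count := by
  induction rel generalizing heap hp count g with
  | nil =>
    have : 0 < hp := by simpa using hpos
    cases g <;> simp [aloop, this]
  | cons r rs ih =>
    obtain ⟨g', rfl⟩ : ∃ g', g = g' + 1 := by
      cases g
      · simp at hg
      · exact ⟨_, rfl⟩
    have hrs : rs.sum ≤ 0 := sum_nonpos_of_all (fun x hx => hnp x (List.mem_cons_of_mem _ hx))
    have hhp : 0 < hp + r := by
      simp only [List.sum_cons] at hpos; omega
    rw [aloop, drainA.eq_def]
    simp only [if_neg (by omega : ¬ hp + r ≤ 0)]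
    simp only [List.append_nil]
    exact ih _ _ _ _ (fun x hx => hnp x (List.mem_cons_of_mem _ hx))
      (by simp only [List.sum_cons] at hpos; omega) (by simp at hg ⊢; omega)

-- ===== VERDICT (by name: the statement is the Claim_ definition above) =====
theorem magicTower_spec : Claim_equal_magicTower := by
  intro nums _
  unfold Spec_magicTower magicTower magicTower_alt
  by_cases hs : nums.sum < 0
  · simp [hs]
  · simp only [if_neg hs]
    have hmain := aloop_main nums [] 1 [] 0 (nums.length + 1)
    have hr := runR_nonpos nums 1 [] 0 (by simp)
    have hsum := runR_sum nums 1 [] 0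
    have hlen := runR_len nums 1 [] 0
    have htail := aloop_tail (runR nums 1 [] 0).2.2.2 (runR nums 1 [] 0).2.1
      (runR nums 1 [] 0).1 (runR nums 1 [] 0).2.2.1 (nums.length + 1)
      hr.2 (by omega) (by simp at hlen; omega)
    rw [show 2 * nums.length + 1 = nums.length + (nums.length + 1) by omega,
        show nums = nums ++ [] by simp] at *
    simp only [List.append_nil] at *
    rw [hmain, List.nil_append, htail, foldB_eq_runR]
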